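-- pv_equiv track=rewrite | github.com/ChanMo/TikLocal | tiklocal/services/collections.py | _normalize_mutation_uris
-- ===== SOURCE A (Python) =====
-- from typing import Any
--
-- MAX_COLLECTION_ITEMS_MUTATION = 200
--
-- def _normalize_uri(value: Any) -> str:
--     text = str(value or "").strip().replace("\\", "/")
--     while text.startswith("./"):
--         text = text[2:]
--     return text
--
-- def _normalize_mutation_uris(uris: Any) -> list[str]:
--     if not isinstance(uris, list):
--         return []
--     normalized: list[str] = []
--     seen: set[str] = set()
--     for item in uris:
--         uri = _normalize_uri(item)
--         if not uri or uri in seen: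
--             continue
--         seen.add(uri)
--         normalized.append(uri)
--         if len(normalized) >= MAX_COLLECTION_ITEMS_MUTATION:
--             break
--     return normalized
-- ===== SOURCE B (Python) =====
-- from typing import Any
--
-- MAX_COLLECTION_ITEMS_MUTATION = 200
--
-- def _normalize_uri(value: Any) -> str:
--     text = str(value or "").strip().replace("\\", "/")
--     while text.startswith("./"):
--         text = text[2:]
--     return text
--
-- def _normalize_mutation_uris(uris: Any) -> list[str]:
--     if not isinstance(uris, list):
--         return []
--     remaining = [u for u in map(_normalize_uri, uris) if u]
--     result: list[str] = []
--     while remaining and len(result) < MAX_COLLECTION_ITEMS_MUTATION: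
--         head = remaining[0]
--         result.append(head)
--         remaining = [u for u in remaining[1:] if u != head]
--     return result
-- ===== Notes on version B (the rewrite author's own statement) =====
-- stated objective: alternative
-- what changed: Replaced the single-pass seen-set loop by a select-then-filter dedup: normalize and drop empties first, then repeatedly take the first remaining element and filter all its later duplicates out of the remainder (no seen set, no membership test), stopping once 200 items are selected.
import Mathlib
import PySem

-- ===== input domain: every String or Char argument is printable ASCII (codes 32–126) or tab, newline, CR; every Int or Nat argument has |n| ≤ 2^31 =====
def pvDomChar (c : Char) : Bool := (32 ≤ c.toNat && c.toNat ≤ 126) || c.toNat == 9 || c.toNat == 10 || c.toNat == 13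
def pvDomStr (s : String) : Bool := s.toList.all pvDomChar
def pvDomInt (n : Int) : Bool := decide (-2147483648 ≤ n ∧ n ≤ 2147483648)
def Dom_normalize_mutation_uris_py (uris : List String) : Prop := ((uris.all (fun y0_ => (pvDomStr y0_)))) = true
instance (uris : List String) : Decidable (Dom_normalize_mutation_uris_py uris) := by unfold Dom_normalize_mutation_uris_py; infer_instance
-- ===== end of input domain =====

-- B replaces A's single-pass seen-set loop by a select-then-filter dedup: normalize and drop
-- empties first, then repeatedly take the first remaining element and filter its later
-- duplicates out of the remainder (no seen set), stopping once 200 items are selected.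

-- ===== PORT A =====
-- shared helper: _normalize_uri. On a String s, 'str(s or "")' is s itself ('' stays ''), so it is
-- strip, then replace '\' by '/', then the while-loop stripping leading "./" (ported on List Char).
def pvDropDotSlash : List Char → List Char
  | '.' :: '/' :: rest => pvDropDotSlash rest          -- while text.startswith("./"): text = text[2:]
  | cs => cs

def pvNormUri (s : String) : String :=
  String.ofList (pvDropDotSlash (PySem.Str.replace (PySem.Str.strip s) "\\" "/").toList)

-- the for-loop of A: state = (seen, normalized); 'continue' and the early 'break' at 200 kept as written
def pvLoopA : List String → PySem.Set String → List String → List String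
  | [], _, normalized => normalized
  | item :: rest, seen, normalized =>
    let uri := pvNormUri item
    if uri = "" ∨ PySem.Set.contains seen uri then pvLoopA rest seen normalized
    else
      let normalized' := normalized ++ [uri]
      if 200 ≤ normalized'.length then normalized'
      else pvLoopA rest (PySem.Set.add seen uri) normalized'

-- the 'isinstance(uris, list)' guard is always true on List String
def normalize_mutation_uris_py (uris : List String) : List String :=
  pvLoopA uris PySem.Set.empty []

-- ===== PORT B =====
-- the while-loop of Source B: while remaining and len(result) < 200:
--   result.append(remaining[0]); remaining = [u for u in remaining[1:] if u != head]
def pvSelectFilterLoop : List String → List String → List String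
  | [], result => result
  | head :: rest, result =>
    if 200 ≤ result.length then result
    else pvSelectFilterLoop (rest.filter (fun u => u ≠ head)) (result ++ [head])
termination_by remaining _ => remaining.length
decreasing_by
  simp only [List.length_unattach, List.length_cons]
  exact Nat.lt_succ_of_le (le_trans (List.length_filter_le _ _) (by simp))

def normalize_mutation_uris_py_alt (uris : List String) : List String :=
  pvSelectFilterLoop ((uris.map pvNormUri).filter (fun u => u ≠ "")) []

-- ===== PRECONDITION & SPEC =====
def Spec_normalize_mutation_uris_py (uris : List String) (out : List String) : Prop := out = normalize_mutation_uris_py_alt uris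
instance (uris : List String) (out : List String) : Decidable (Spec_normalize_mutation_uris_py uris out) := by unfold Spec_normalize_mutation_uris_py; infer_instance

-- ===== CLAIM (what is proved, stated in full; the proofs are below) =====
def Claim_equal_normalize_mutation_uris_py : Prop := ∀ (uris : List String), Dom_normalize_mutation_uris_py uris → Spec_normalize_mutation_uris_py uris (normalize_mutation_uris_py uris)

-- ===== LEMMAS AND PROOFS =====

-- common description of the deduped normalized stream relative to a seen-set
def pvG : List String → PySem.Set String → List String
  | [], _ => []
  | item :: rest, seen =>
    let uri := pvNormUri item
    if uri = "" ∨ PySem.Set.contains seen uri then pvG rest seen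
    else uri :: pvG rest (PySem.Set.add seen uri)

theorem pvLoopA_eq_g (l : List String) (seen : PySem.Set String) (acc : List String)
    (h : acc.length < 200) :
    pvLoopA l seen acc = acc ++ (pvG l seen).take (200 - acc.length) := by
  induction l generalizing seen acc with
  | nil => simp [pvLoopA, pvG]
  | cons item rest ih =>
    simp only [pvLoopA, pvG]
    split_ifs with h1 h2
    · exact ih seen acc h
    · -- early break: acc just reached length 200
      have hlen : acc.length = 199 := by
        simp only [List.length_append, List.length_singleton] at h2; omega
      have ht : 200 - acc.length = 1 := by omega
      rw [ht, List.take_succ_cons, List.take_zero]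
    · have hlen : (acc ++ [pvNormUri item]).length < 200 := by omega
      rw [ih _ _ hlen]
      have h200 : 200 - acc.length = (200 - (acc ++ [pvNormUri item]).length) + 1 := by
        simp only [List.length_append, List.length_singleton] at hlen ⊢; omega
      rw [h200, List.take_succ_cons, List.append_assoc, List.singleton_append]

-- proof helper: the unbounded select-then-filter dedup
def pvSelectFilter : List String → List String
  | [] => []
  | head :: rest => head :: pvSelectFilter (rest.filter (fun u => u ≠ head))
termination_by l => l.length
decreasing_by
  simp only [List.length_unattach, List.length_cons]
  exact Nat.lt_succ_of_le (le_trans (List.length_filter_le _ _) (by simp))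

theorem pvSelectFilter_cons (h : String) (t : List String) :
    pvSelectFilter (h :: t) = h :: pvSelectFilter (t.filter (fun u => u ≠ h)) := by
  rw [pvSelectFilter]

theorem pvSelectFilterLoop_eq (remaining result : List String) :
    result.length ≤ 200 →
    pvSelectFilterLoop remaining result =
      result ++ (pvSelectFilter remaining).take (200 - result.length) := by
  induction remaining, result using pvSelectFilterLoop.induct with
  | case1 result =>
    intro _
    rw [pvSelectFilterLoop, show pvSelectFilter [] = [] from by rw [pvSelectFilter]]
    simp
  | case2 head rest result hfull =>
    intro h
    have h0 : 200 - result.length = 0 := by omega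
    rw [pvSelectFilterLoop, if_pos hfull, h0]
    simp
  | case3 head rest result hfull ih =>
    intro h
    rw [List.unattach_filter (g := fun u => !decide (u = head)) (hf := fun x hx => by simp),
        List.unattach_attach] at ih
    have h1 : (result ++ [head]).length ≤ 200 := by
      simp only [List.length_append, List.length_singleton]; omega
    rw [pvSelectFilterLoop, if_neg hfull, pvSelectFilter_cons]
    have h2 : 200 - result.length = (200 - (result ++ [head]).length) + 1 := by
      simp only [List.length_append, List.length_singleton]; omega
    rw [h2, List.take_succ_cons, ← List.singleton_append, ← List.append_assoc]
    simp only [ne_eq, decide_not] at ih ⊢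
    simpa using ih h1

-- pvG with a seen-set equals B's select-then-filter dedup of the cleaned stream with seen removed
set_option maxHeartbeats 1000000 in
theorem pvG_eq_select (l : List String) (seen : PySem.Set String) :
    pvG l seen =
      pvSelectFilter (((l.map pvNormUri).filter (fun u => u ≠ "")).filter
        (fun u => !(PySem.Set.contains seen u))) := by
  induction l generalizing seen with
  | nil =>
    simp only [List.map_nil, List.filter_nil]
    rw [show pvSelectFilter [] = [] from by rw [pvSelectFilter]]
    simp [pvG]
  | cons item rest ih =>
    simp only [pvG, List.map_cons]
    by_cases he : pvNormUri item = ""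
    · rw [if_pos (Or.inl he), List.filter_cons, if_neg (by simp [he])]
      exact ih seen
    · have hne : decide (pvNormUri item ≠ "") = true := by simp [he]
      by_cases hc : PySem.Set.contains seen (pvNormUri item) = true
      · rw [if_pos (Or.inr hc),
          List.filter_cons, if_pos hne, List.filter_cons,
          if_neg (by simp; exact (PySem.Set.contains_iff seen (pvNormUri item)).mp hc)]
        exact ih seen
      · have hm : pvNormUri item ∉ seen := fun hmem =>
          hc ((PySem.Set.contains_iff seen (pvNormUri item)).mpr hmem)
        rw [if_neg (not_or.mpr ⟨he, hc⟩), List.filter_cons, if_pos hne, List.filter_cons,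
          if_pos (show (!PySem.Set.contains seen (pvNormUri item)) = true by simp; exact hm)]
        rw [pvSelectFilter_cons (pvNormUri item)]
        refine congrArg (List.cons (pvNormUri item)) ?_
        rw [ih (PySem.Set.add seen (pvNormUri item))]
        refine congrArg pvSelectFilter ?_
        simp only [List.filter_filter]
        refine List.filter_congr fun u _ => ?_
        rw [PySem.Set.add_of_not_mem hm]
        by_cases hu : u ∈ seen
        · have h1 : PySem.Set.contains seen u = true := (PySem.Set.contains_iff seen u).mpr hu
          simp [PySem.Set.contains] at h1
          simp [PySem.Set.contains, h1]
        · have h1 : PySem.Set.contains seen u = false := by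
            by_contra hne2
            exact hu ((PySem.Set.contains_iff seen u).mp (by simpa using hne2))
          simp [PySem.Set.contains] at h1
          by_cases hequri : u = pvNormUri item <;>
            simp [PySem.Set.contains, h1, hequri]

-- ===== VERDICT (by name: the statement is the Claim_ definition above) =====
theorem normalize_mutation_uris_py_spec : Claim_equal_normalize_mutation_uris_py := by
  intro uris _
  unfold Spec_normalize_mutation_uris_py normalize_mutation_uris_py normalize_mutation_uris_py_alt
  rw [pvLoopA_eq_g uris PySem.Set.empty [] (by simp),
    pvSelectFilterLoop_eq _ [] (by simp)]
  have hsel : pvSelectFilter ((uris.map pvNormUri).filter (fun u => u ≠ "")) = pvG uris PySem.Set.empty := by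
    rw [pvG_eq_select uris PySem.Set.empty]
    congr 1
    simp [PySem.Set.empty, PySem.Set.contains]
  rw [hsel]
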